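-- pv_equiv track=rewrite | github.com/alestar/InterviewPrep | src/MyPython/JomaClass/Questions/FixedPoint.py | find_fixed_point_helper
-- ===== SOURCE A (Python) =====
-- def find_fixed_point_helper(low, high, nums):
-- 	if low == high:
-- 		return None
--
-- 	mid = int((low + high) / 2)  # (low + high) // 2
-- 	if nums[mid] == mid:
-- 		return mid
-- 	if nums[mid] < mid:
-- 		return find_fixed_point_helper(mid+1, high, nums)
-- 	else:
-- 		return find_fixed_point_helper(low, mid, nums)
-- ===== SOURCE B (Python) =====
-- def find_fixed_point_helper(low, high, nums):
--     # Offset-based search: maintain the left bound and the remaining interval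
--     # LENGTH n instead of the pair of bounds; probe at offset n//2 from low.
--     n = high - low
--     while n:
--         k = n // 2
--         i = low + k
--         val = nums[i]
--         if val == i:
--             return i
--         low, n = (i + 1, n - k - 1) if val < i else (low, k)
--     return None
-- ===== Notes on version B (the rewrite author's own statement) =====
-- stated objective: alternative
-- what changed: Replaces the recursive two-bound binary search by an iterative offset-based search whose loop state is the left bound plus the remaining interval LENGTH n (probe at offset n//2, shrink n directly), ported as an explicit step/driver state machine.
-- outside the precondition, e.g. on find_fixed_point_helper(-2, -1, [0, -1]): A returns -1, B returns None
import Mathlib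
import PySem

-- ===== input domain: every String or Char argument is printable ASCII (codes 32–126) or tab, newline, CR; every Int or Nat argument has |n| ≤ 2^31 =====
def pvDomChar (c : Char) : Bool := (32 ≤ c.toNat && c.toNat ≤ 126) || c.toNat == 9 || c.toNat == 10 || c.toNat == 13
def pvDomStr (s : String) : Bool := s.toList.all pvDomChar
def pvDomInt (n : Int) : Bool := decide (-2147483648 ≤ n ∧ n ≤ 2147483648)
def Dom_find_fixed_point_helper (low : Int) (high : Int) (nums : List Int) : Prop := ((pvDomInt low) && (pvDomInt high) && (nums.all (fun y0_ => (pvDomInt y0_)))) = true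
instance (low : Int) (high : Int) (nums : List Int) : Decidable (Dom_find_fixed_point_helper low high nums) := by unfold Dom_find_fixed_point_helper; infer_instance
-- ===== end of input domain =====

-- B replaces A's recursive two-bound binary search by an iterative length-based search
-- (loop state = left bound + remaining interval length); same results on Pre_.


-- ===== PORT A =====
-- A's recursion is not structurally decreasing for arbitrary Int bounds, so it carries a
-- fuel counter; the wrapper supplies (high-low).natAbs+2 fuel, enough for every
-- terminating run of the Python (each recursive call at least halves |high-low|).  int((low+high)/2) truncates toward
-- zero on the domain's |n| ≤ 2^31 (exact in a double), i.e. Int.tdiv.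
def findAgo : Nat → Int → Int → List Int → Option Int
  | 0, _, _, _ => none
  | f + 1, low, high, nums =>
    if low == high then none
    else
      let mid := (low + high).tdiv 2
      match PySem.List.pyGet? nums mid with
      | none => none   -- nums[mid] raises IndexError: excluded by Pre_
      | some v =>
        if v == mid then some mid
        else if v < mid then findAgo f (mid + 1) high nums
        else findAgo f low mid nums

def find_fixed_point_helper (low : Int) (high : Int) (nums : List Int) : Option Int :=
  findAgo ((high - low).natAbs + 2) low high nums

-- ===== PORT B =====
-- B's while-loop over the state (low, n = remaining length), transcribed as a state
-- machine: stepB is one execution of the loop body (Sum.inl = updated state, Sum.inr =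
-- the function returns), runB drives it.  `while n:` does not structurally terminate
-- for arbitrary Int state, so the driver iterates on a fuel counter; the wrapper
-- supplies (high-low).natAbs + 2 fuel, enough for every terminating run of the Python
-- loop (a positive n shrinks by at least 1 per step, a negative n that does not return
-- diverges within |n| steps).
def stepB (lo : Int) (n : Int) (xs : List Int) : (Int × Int) ⊕ Option Int :=
  if n = 0 then Sum.inr none
  else
    let k := n.fdiv 2
    let i := lo + k
    (PySem.List.pyGet? xs i).elim (Sum.inr none) fun val =>   -- val = nums[i]; elim's none arm = IndexError, excluded by Pre_
      if val = i then Sum.inr (some i)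
      else Sum.inl (if val < i then (i + 1, n - k - 1) else (lo, k))

def runB : Nat → Int × Int → List Int → Option Int
  | 0, _, _ => none
  | fuel + 1, st, xs =>
    match stepB st.1 st.2 xs with
    | Sum.inr res => res
    | Sum.inl st' => runB fuel st' xs

def find_fixed_point_helper_alt (low : Int) (high : Int) (nums : List Int) : Option Int :=
  runB ((high - low).natAbs + 2) (low, high - low) nums

-- ===== PRECONDITION & SPEC =====
-- Pre_ admits the helper's intended call pattern (bounds within the list) plus the
-- trivially-returning low = high case; outside it A may wrap negative indices (an
-- accidental value), raise IndexError, or recurse without bound.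
def Pre_find_fixed_point_helper (low : Int) (high : Int) (nums : List Int) : Prop :=
  low = high ∨ (0 ≤ low ∧ low ≤ high ∧ high ≤ (nums.length : Int))
instance (low : Int) (high : Int) (nums : List Int) : Decidable (Pre_find_fixed_point_helper low high nums) := by unfold Pre_find_fixed_point_helper; infer_instance

def pvWitness_find_fixed_point_helper : Int × Int × List Int := (0, 4, [-2, 0, 1, 3, 7])

def Spec_find_fixed_point_helper (low : Int) (high : Int) (nums : List Int) (out : Option Int) : Prop := out = find_fixed_point_helper_alt low high nums
instance (low : Int) (high : Int) (nums : List Int) (out : Option Int) : Decidable (Spec_find_fixed_point_helper low high nums out) := by unfold Spec_find_fixed_point_helper; infer_instance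

-- ===== CLAIM (what is proved, stated in full; the proofs are below) =====
def Claim_equal_find_fixed_point_helper : Prop := ∀ (low : Int) (high : Int) (nums : List Int), Dom_find_fixed_point_helper low high nums → Pre_find_fixed_point_helper low high nums → Spec_find_fixed_point_helper low high nums (find_fixed_point_helper low high nums)

-- ===== LEMMAS AND PROOFS =====

-- With enough fuel on both sides and ordered nonnegative bounds, A's recursion on
-- (low, high) follows the same trajectory as B's state machine over (low, n = high - low).
lemma findAgo_eq_runB : ∀ (f : Nat) (g : Nat) (low high : Int) (nums : List Int),
    (high - low).toNat < f → (high - low).toNat < g → 0 ≤ low → low ≤ high →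
    findAgo f low high nums = runB g (low, high - low) nums := by
  intro f
  induction f with
  | zero => intro g low high nums hf; omega
  | succ f ih =>
    intro g low high nums hf hg hlo hle
    obtain ⟨g, rfl⟩ : ∃ g', g = g' + 1 := ⟨g - 1, by omega⟩
    by_cases heq : low = high
    · subst heq
      simp [findAgo, runB, stepB]
    · have hlt : low < high := lt_of_le_of_ne hle heq
      have hne : high - low ≠ 0 := by omega
      have hmid : (low + high).tdiv 2 = low + (high - low).fdiv 2 := by
        rw [Int.tdiv_eq_ediv_of_nonneg (by omega), Int.fdiv_eq_ediv]
        have h2 : (2:Int) ∣ high - low ∨ ¬ (2:Int) ∣ high - low := em _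
        rcases h2 with h2|h2 <;> simp [h2] <;> omega
      have hkb : 0 ≤ (high - low).fdiv 2 ∧ (high - low).fdiv 2 < high - low := by
        rw [Int.fdiv_eq_ediv]
        omega
      have hrun : runB (g + 1) (low, high - low) nums =
          (match PySem.List.pyGet? nums (low + (high - low).fdiv 2) with
            | none => none
            | some v =>
              if v = low + (high - low).fdiv 2 then some (low + (high - low).fdiv 2)
              else if v < low + (high - low).fdiv 2 then
                runB g (low + (high - low).fdiv 2 + 1, high - low - (high - low).fdiv 2 - 1) nums
              else runB g (low, (high - low).fdiv 2) nums) := by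
        rw [runB]
        show (match stepB low (high - low) nums with
              | Sum.inr res => res
              | Sum.inl st' => runB g st' nums) = _
        unfold stepB
        rw [if_neg hne]
        cases h : PySem.List.pyGet? nums (low + (high - low).fdiv 2) with
        | none => simp [h]
        | some v =>
          by_cases hv : v = low + (high - low).fdiv 2
          · simp [h, hv]
          · by_cases hl : v < low + (high - low).fdiv 2 <;> simp [h, hv, hl]
      show (if (low == high) = true then none
            else match PySem.List.pyGet? nums ((low + high).tdiv 2) with
              | none => none
              | some v => if (v == (low + high).tdiv 2) = true then some ((low + high).tdiv 2)
                  else if v < (low + high).tdiv 2 then findAgo f ((low + high).tdiv 2 + 1) high nums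
                  else findAgo f low ((low + high).tdiv 2) nums) = _
      rw [if_neg (by simpa using heq), hmid, hrun]
      cases h : PySem.List.pyGet? nums (low + (high - low).fdiv 2) with
      | none => rfl
      | some v =>
        simp only [beq_iff_eq]
        split_ifs with hv hlt2
        · rfl
        · have := ih g (low + (high - low).fdiv 2 + 1) high nums (by omega) (by omega) (by omega) (by omega)
          rw [this]
          congr 2
          omega
        · have := ih g low (low + (high - low).fdiv 2) nums (by omega) (by omega) hlo (by omega)
          rw [this]
          congr 2
          omega

-- ===== VERDICT (by name: the statement is the Claim_ definition above) =====
theorem find_fixed_point_helper_spec : Claim_equal_find_fixed_point_helper := by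
  intro low high nums _ hpre
  unfold Spec_find_fixed_point_helper find_fixed_point_helper find_fixed_point_helper_alt
  rcases hpre with heq | ⟨h0, h1, h2⟩
  · subst heq
    simp [findAgo, runB, stepB]
  · exact findAgo_eq_runB _ _ low high nums (by omega) (by omega) h0 h1
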